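-- pv_equiv track=rewrite | github.com/IDP-code/NetBeacon | tree_to_table/utils.py | range_to_tenary
-- ===== SOURCE A (Python) =====
-- def find_next_split(minz,maxz):
--     count=0
--     while (minz>>count)&1==0 and (minz+(1<<count))<maxz:
--         count+=1
--     if (minz+(1<<count))>maxz:
--         return 1<<(count-1)
--     return 1<<count
--
-- def range_to_tenary(minz,maxz): #[minz,maxz)
--     # return value: for example, range_to_tenary(0,48) return [0, 32] and [32, 16],
--     # Two prefixes, the first covering 32 numbers starting from 0 and the second covering 16 numbers starting from 32
--     if maxz<=minz:
--         return [[],[]]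
--     start_num = []
--     bcount = []
--     while True:
--         a = find_next_split(minz,maxz)
--         start_num.append(minz)
--         bcount.append(a)
--         if minz+a==maxz:
--             break
--         minz+=a
--     return start_num,bcount
-- ===== SOURCE B (Python) =====
-- def range_to_tenary(minz, maxz):  # [minz,maxz)
--     # Closed-form block size instead of A's per-bit scanning loop:
--     # each block is min(lowest set bit of minz, largest power of two <= remaining range).
--     if maxz <= minz:
--         return [[], []]
--     start_num = []
--     bcount = []
--     while minz < maxz:
--         r = maxz - minz
--         align = minz & -minz if minz != 0 else r
--         block = min(align, 1 << (r.bit_length() - 1))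
--         start_num.append(minz)
--         bcount.append(block)
--         minz += block
--     return start_num, bcount
-- ===== Notes on version B (the rewrite author's own statement) =====
-- stated objective: simpler
-- what changed: A's find_next_split scans bits one at a time in an inner while loop (with an overshoot-then-halve correction); B computes each block size directly as min(minz & -minz, largest power of two <= remaining range), keeping only the outer decomposition loop.
import Mathlib
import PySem

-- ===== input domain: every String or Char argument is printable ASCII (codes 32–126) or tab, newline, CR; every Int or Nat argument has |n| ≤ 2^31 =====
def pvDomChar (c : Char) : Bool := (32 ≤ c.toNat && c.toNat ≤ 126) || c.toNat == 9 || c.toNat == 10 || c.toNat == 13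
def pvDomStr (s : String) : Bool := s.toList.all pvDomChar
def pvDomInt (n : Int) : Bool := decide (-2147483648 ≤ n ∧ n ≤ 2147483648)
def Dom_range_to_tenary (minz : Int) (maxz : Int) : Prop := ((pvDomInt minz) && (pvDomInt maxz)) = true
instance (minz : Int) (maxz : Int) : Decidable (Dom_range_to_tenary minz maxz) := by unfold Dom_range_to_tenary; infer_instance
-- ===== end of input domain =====

-- B replaces A's per-bit scanning inner loop by a closed-form block size
-- (lowest set bit of minz vs largest power of two ≤ remaining range); objective: simpler.

-- ===== PORT A =====
-- Python's `(minz>>count)&1` is `PySem.Int.band (minz >>> count) 1` and `1<<count` is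
-- `(1:Int) <<< count` (exact, including negative minz).  The while loop carries `count`;
-- within the claimed domain (|ints| ≤ 2^31) it runs at most 34 times, so fuel 64 is exact
-- there (fuel is only a totality guard).
def fnsLoop (minz maxz : Int) : Nat → Nat → Nat
  | 0, count => count
  | fuel+1, count =>
    if PySem.Int.band (minz >>> count) 1 = 0 ∧ minz + ((1:Int) <<< count) < maxz then
      fnsLoop minz maxz fuel (count+1)
    else count

-- Python's `1<<(count-1)` with count = 0 would raise; that branch is unreachable when
-- minz < maxz, the only way find_next_split is reached.  `count - 1` is Nat subtraction.
def find_next_split (minz maxz : Int) : Int :=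
  let count := fnsLoop minz maxz 64 0
  if minz + ((1:Int) <<< count) > maxz then (1:Int) <<< (count - 1) else (1:Int) <<< count

-- A's `while True` loop; each step advances minz by at least 1, so fuel (maxz-minz).toNat
-- is only a totality guard (never exhausted when minz < maxz).
def rttLoopA (maxz : Int) : Nat → Int → List Int → List Int → List Int × List Int
  | 0, _minz, start, bc => (start, bc)
  | fuel+1, minz, start, bc =>
    let a := find_next_split minz maxz
    let start' := start ++ [minz]
    let bc' := bc ++ [a]
    if minz + a = maxz then (start', bc') else rttLoopA maxz fuel (minz + a) start' bc'

def range_to_tenary (minz : Int) (maxz : Int) : List Int × List Int :=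
  if maxz ≤ minz then ([], []) else rttLoopA maxz (maxz - minz).toNat minz [] []

-- ===== PORT B =====
-- Python's `minz & -minz` is `PySem.Int.band minz (-minz)` and `1 << (r.bit_length() - 1)`
-- is `(1:Int) <<< (PySem.Int.bitLength r - 1)` (both exact; r ≥ 1 whenever evaluated).
def blockB (minz maxz : Int) : Int :=
  let r := maxz - minz
  let align := if minz ≠ 0 then PySem.Int.band minz (-minz) else r
  min align ((1:Int) <<< (PySem.Int.bitLength r - 1))

-- B's `while minz < maxz` loop; fuel (maxz-minz).toNat is only a totality guard.
def rttLoopB (maxz : Int) : Nat → Int → List Int → List Int → List Int × List Int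
  | 0, _minz, start, bc => (start, bc)
  | fuel+1, minz, start, bc =>
    if minz < maxz then
      rttLoopB maxz fuel (minz + blockB minz maxz) (start ++ [minz]) (bc ++ [blockB minz maxz])
    else (start, bc)

def range_to_tenary_alt (minz : Int) (maxz : Int) : List Int × List Int :=
  if maxz ≤ minz then ([], []) else rttLoopB maxz (maxz - minz).toNat minz [] []

-- ===== PRECONDITION & SPEC =====
def Spec_range_to_tenary (minz : Int) (maxz : Int) (out : List Int × List Int) : Prop := out = range_to_tenary_alt minz maxz
instance (minz : Int) (maxz : Int) (out : List Int × List Int) : Decidable (Spec_range_to_tenary minz maxz out) := by unfold Spec_range_to_tenary; infer_instance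

-- ===== CLAIM (what is proved, stated in full; the proofs are below) =====
def Claim_equal_range_to_tenary : Prop := ∀ (minz : Int) (maxz : Int), Dom_range_to_tenary minz maxz → Spec_range_to_tenary minz maxz (range_to_tenary minz maxz)

-- ===== LEMMAS AND PROOFS =====

-- the loop condition of fnsLoop, named for the proofs
def fnsCond (minz maxz : Int) (j : Nat) : Prop :=
  PySem.Int.band (minz >>> j) 1 = 0 ∧ minz + ((1:Int) <<< j) < maxz

lemma fnsLoop_eq (minz maxz : Int) (stop : Nat)
    (h1 : ∀ j, j < stop → fnsCond minz maxz j) (h2 : ¬ fnsCond minz maxz stop) :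
    ∀ fuel count, count ≤ stop → stop ≤ count + fuel → fnsLoop minz maxz fuel count = stop := by
  intro fuel
  induction fuel with
  | zero =>
    intro count hc1 hc2
    have hcs : count = stop := by omega
    simpa [fnsLoop] using hcs
  | succ fuel ih =>
    intro count hc1 hc2
    by_cases h : count = stop
    · subst h
      simp only [fnsLoop]
      rw [if_neg (by simpa [fnsCond] using h2)]
    · have hlt : count < stop := by omega
      simp only [fnsLoop]
      rw [if_pos (by simpa [fnsCond] using h1 count hlt)]
      exact ih (count+1) (by omega) (by omega)

-- n &&& (n-1) clears the lowest set bit (Nat form, trailing-zero factorization explicit)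
lemma nat_and_pred (t k : Nat) :
    (2^t*(2*k+1)) &&& (2^t*(2*k+1) - 1) = 2^t*(2*k+1) - 2^t := by
  induction t with
  | zero =>
    simp only [pow_zero, one_mul]
    apply Nat.eq_of_testBit_eq
    intro i
    rw [Nat.testBit_land]
    cases i with
    | zero =>
      simp only [Nat.testBit_zero]
      have e1 : (2*k+1) % 2 = 1 := by omega
      have e2 : (2*k+1-1) % 2 = 0 := by omega
      simp [e1]
    | succ i =>
      simp only [Nat.testBit_succ]
      have h1 : (2*k+1)/2 = k := by omega
      have h2 : (2*k+1-1)/2 = k := by omega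
      rw [h1, h2, Bool.and_self]
  | succ t ih =>
    have hpos : 1 ≤ 2^t*(2*k+1) := Nat.one_le_iff_ne_zero.mpr (by positivity)
    have hle : 2^t*1 ≤ 2^t*(2*k+1) := Nat.mul_le_mul_left _ (by omega)
    rw [mul_one] at hle
    have hdouble : 2^(t+1)*(2*k+1) = 2*(2^t*(2*k+1)) := by ring
    have hp : (2:Nat)^(t+1) = 2*2^t := by ring
    rw [hdouble, hp]
    apply Nat.eq_of_testBit_eq
    intro i
    rw [Nat.testBit_land]
    cases i with
    | zero =>
      simp only [Nat.testBit_zero]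
      have e1 : (2*(2^t*(2*k+1))) % 2 = 0 := by omega
      have e2 : (2*(2^t*(2*k+1)) - 1) % 2 = 1 := by omega
      have e3 : (2*(2^t*(2*k+1)) - 2*2^t) % 2 = 0 := by omega
      simp [e1, e2, e3]
    | succ i =>
      simp only [Nat.testBit_succ]
      have e1 : (2*(2^t*(2*k+1)))/2 = 2^t*(2*k+1) := by omega
      have e2 : (2*(2^t*(2*k+1)) - 1)/2 = 2^t*(2*k+1) - 1 := by omega
      have e3 : (2*(2^t*(2*k+1)) - 2*2^t)/2 = 2^t*(2*k+1) - 2^t := by omega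
      rw [e1, e2, e3, ← Nat.testBit_land, ih]

lemma nat_lowbit (t k n : Nat) (hn : n = 2^t*(2*k+1)) : n - (n &&& (n-1)) = 2^t := by
  subst hn
  rw [nat_and_pred]
  have hle : 2^t*1 ≤ 2^t*(2*k+1) := Nat.mul_le_mul_left _ (by omega)
  rw [mul_one] at hle
  exact Nat.sub_sub_self hle

-- `minz & -minz` is the lowest set bit, i.e. 2^t for the trailing-zero count t of |minz|
lemma band_neg_self (minz : Int) (t k : Nat) (hfac : minz.natAbs = 2^t*(2*k+1)) :
    PySem.Int.band minz (-minz) = (2:Int)^t := by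
  set N := 2^t*(2*k+1) with hN
  have hNpos : 1 ≤ N := Nat.one_le_iff_ne_zero.mpr (by rw [hN]; positivity)
  have hne : minz ≠ 0 := by
    intro h
    rw [h] at hfac
    simp at hfac
    omega
  rcases (by omega : minz < 0 ∨ 0 < minz) with hneg | hpos
  · have e : PySem.Int.band minz (-minz)
        = (((-minz).toNat - ((-minz).toNat &&& (-minz - 1).toNat) : Nat) : Int) := by
      simp only [PySem.Int.band]
      rw [if_neg (by omega), if_pos (by omega)]
    rw [e]
    have h1 : (-minz).toNat = N := by omega
    have h2 : (-minz - 1).toNat = N - 1 := by omega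
    rw [h1, h2, nat_lowbit t k N hN]
    push_cast
    ring
  · have e : PySem.Int.band minz (-minz)
        = ((minz.toNat - (minz.toNat &&& (-(-minz) - 1).toNat) : Nat) : Int) := by
      simp only [PySem.Int.band]
      rw [if_pos (by omega), if_neg (by omega)]
    rw [e]
    have h1 : minz.toNat = N := by omega
    have h2 : (-(-minz) - 1).toNat = N - 1 := by omega
    rw [h1, h2, nat_lowbit t k N hN]
    push_cast
    ring

lemma shift_even (minz : Int) (j : Nat) (h : (2:Int)^(j+1) ∣ minz) :
    PySem.Int.band (minz >>> j) 1 = 0 := by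
  rw [PySem.Int.band_one, PySem.Int.mod_eq_zero_iff_dvd]
  obtain ⟨c, hc⟩ := h
  rw [Int.shiftRight_eq_div_pow]
  have hm : minz = ((2^j : Nat) : Int) * (2*c) := by push_cast; rw [hc]; ring
  rw [hm, Int.mul_ediv_cancel_left _ (by positivity)]
  exact ⟨c, rfl⟩

lemma shift_odd (minz : Int) (t : Nat) (m : Int) (hm : minz = 2^t * m) (hodd : ¬ (2:Int) ∣ m) :
    ¬ PySem.Int.band (minz >>> t) 1 = 0 := by
  rw [PySem.Int.band_one, PySem.Int.mod_eq_zero_iff_dvd, Int.shiftRight_eq_div_pow]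
  have hm' : minz = ((2^t : Nat) : Int) * m := by push_cast; exact hm
  rw [hm', Int.mul_ediv_cancel_left _ (by positivity)]
  exact hodd

-- extract an Int factorization minz = 2^t * (odd) from the Nat one
lemma fac_int (minz : Int) (t k : Nat) (hfac : minz.natAbs = 2^t*(2*k+1)) :
    ∃ mi : Int, minz = 2^t * mi ∧ ¬ (2:Int) ∣ mi := by
  set N := 2^t*(2*k+1) with hN
  rcases (by omega : 0 ≤ minz ∨ minz < 0) with hpos | hneg
  · refine ⟨(2*(k:Int)+1), ?_, by omega⟩
    have hm : minz = ((N : Nat) : Int) := by omega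
    rw [hm, hN]
    push_cast
    ring
  · refine ⟨-(2*(k:Int)+1), ?_, by omega⟩
    have hm : minz = -((N : Nat) : Int) := by omega
    rw [hm, hN]
    push_cast
    ring

-- the per-step heart: A's bit-scanning split equals B's closed-form block
lemma step_eq (minz maxz : Int) (h : minz < maxz) (hb : maxz - minz ≤ 8589934592) :
    find_next_split minz maxz = blockB minz maxz := by
  set r := maxz - minz with hrdef
  have hr : 1 ≤ r := by omega
  have hrn : ((r.toNat : Int)) = r := Int.toNat_of_nonneg (by omega)
  set rn := r.toNat with hrndef
  have hrn1 : 1 ≤ rn := by omega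
  have hna : r.natAbs = rn := by omega
  set BL := PySem.Int.bitLength r with hBLdef
  have hBL1 : 1 ≤ BL := by
    by_contra hc
    have h0 : BL = 0 := by omega
    have hlt := PySem.Int.lt_two_pow_bitLength r
    rw [← hBLdef, h0] at hlt
    simp at hlt
    omega
  set L := BL - 1 with hLdef
  have hBL : BL = L + 1 := by omega
  have hcL : ((2^L : Nat) : Int) = (2:Int)^L := by push_cast; ring
  have hcL1 : ((2^(L+1) : Nat) : Int) = (2:Int)^(L+1) := by push_cast; ring
  have hL1n : 2^L ≤ rn := by
    have := PySem.Int.two_pow_bitLength_le r (by omega)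
    rw [← hBLdef, hna] at this
    exact this
  have hL2n : rn < 2^(L+1) := by
    have := PySem.Int.lt_two_pow_bitLength r
    rw [← hBLdef, hna, hBL] at this
    exact this
  have hL1 : (2:Int)^L ≤ r := by omega
  have hL2 : r < (2:Int)^(L+1) := by omega
  have hL33 : L ≤ 33 := by
    by_contra hc
    have h34 : (2:Nat)^34 ≤ 2^L := Nat.pow_le_pow_right (by norm_num) (by omega)
    have hrn33 : rn ≤ 8589934592 := by omega
    have hx : (2:Nat)^34 ≤ 8589934592 := le_trans h34 (le_trans hL1n hrn33)
    norm_num at hx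
  have hcond : ∀ j, fnsCond minz maxz j ↔
      (PySem.Int.band (minz >>> j) 1 = 0 ∧ (2:Int)^j < r) := by
    intro j
    unfold fnsCond
    rw [Int.shiftLeft_eq, one_mul]
    constructor
    · rintro ⟨a, b⟩; exact ⟨a, by omega⟩
    · rintro ⟨a, b⟩; exact ⟨a, by omega⟩
  have heval : ∀ stop : Nat, stop ≤ 34 →
      (∀ j, j < stop → fnsCond minz maxz j) → ¬ fnsCond minz maxz stop →
      find_next_split minz maxz =
        (if maxz < minz + (2:Int)^stop then (2:Int)^(stop-1) else (2:Int)^stop) := by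
    intro stop hs h1 h2
    have hloop : fnsLoop minz maxz 64 0 = stop :=
      fnsLoop_eq minz maxz stop h1 h2 64 0 (by omega) (by omega)
    unfold find_next_split
    rw [hloop]
    simp only [Int.shiftLeft_eq, one_mul, gt_iff_lt]
  have hblock0 : blockB minz maxz
      = min (if minz ≠ 0 then PySem.Int.band minz (-minz) else r) ((2:Int)^L) := by
    unfold blockB
    rw [← hrdef]
    simp only [Int.shiftLeft_eq, one_mul, ← hBLdef, ← hLdef]
  have hjL : ∀ j : Nat, j < L → (2:Int)^j < r := by
    intro j hj
    have hn : (2^j : Nat) < (2^L : Nat) := Nat.pow_lt_pow_right (by norm_num) hj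
    have hcj : ((2^j : Nat) : Int) = (2:Int)^j := by push_cast; ring
    omega
  have hjLe : ∀ j : Nat, j ≤ L → (2:Int)^j ≤ (2:Int)^L := by
    intro j hj
    have hn : (2^j : Nat) ≤ (2^L : Nat) := Nat.pow_le_pow_right (by norm_num) hj
    have hcj : ((2^j : Nat) : Int) = (2:Int)^j := by push_cast; ring
    omega
  by_cases hz : minz = 0
  · -- minz = 0 : every bit of minz is 0; align = r
    have heven : ∀ j : Nat, PySem.Int.band (minz >>> j) 1 = 0 := by
      intro j
      exact shift_even minz j (by rw [hz]; exact dvd_zero _)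
    have hblock : blockB minz maxz = min r ((2:Int)^L) := by
      rw [hblock0, if_neg (by simpa using hz)]
    by_cases hpow : rn = 2^L
    · have hreq : r = (2:Int)^L := by omega
      have h1 : ∀ j, j < L → fnsCond minz maxz j :=
        fun j hj => (hcond j).mpr ⟨heven j, hjL j hj⟩
      have h2 : ¬ fnsCond minz maxz L := fun hc => by
        have := ((hcond L).mp hc).2
        omega
      rw [heval L (by omega) h1 h2, if_neg (by omega), hblock, min_eq_right (by omega)]
    · have hlt : (2:Int)^L < r := by omega
      have h1 : ∀ j, j < L+1 → fnsCond minz maxz j := by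
        intro j hj
        refine (hcond j).mpr ⟨heven j, ?_⟩
        have := hjLe j (by omega)
        omega
      have h2 : ¬ fnsCond minz maxz (L+1) := fun hc => by
        have := ((hcond (L+1)).mp hc).2
        omega
      rw [heval (L+1) (by omega) h1 h2, if_pos (by omega), Nat.add_sub_cancel,
        hblock, min_eq_right (by omega)]
  · -- minz ≠ 0 : align = 2^t; bits below t are 0, bit t is 1
    obtain ⟨t, m, hmo, hfac0⟩ := Nat.exists_eq_two_pow_mul_odd (Int.natAbs_ne_zero.mpr hz)
    obtain ⟨k, hk⟩ := hmo
    have hfac : minz.natAbs = 2^t*(2*k+1) := by rw [hfac0, hk]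
    obtain ⟨mi, hmi, hmodd⟩ := fac_int minz t k hfac
    have halign : PySem.Int.band minz (-minz) = (2:Int)^t := band_neg_self minz t k hfac
    have hblock : blockB minz maxz = min ((2:Int)^t) ((2:Int)^L) := by
      rw [hblock0, if_pos (by simpa using hz), halign]
    have heven : ∀ j : Nat, j < t → PySem.Int.band (minz >>> j) 1 = 0 := by
      intro j hj
      refine shift_even minz j ?_
      rw [hmi]
      exact Dvd.dvd.mul_right (pow_dvd_pow 2 (by omega)) mi
    have hoddt : ¬ PySem.Int.band (minz >>> t) 1 = 0 := shift_odd minz t mi hmi hmodd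
    by_cases ht : t ≤ L
    · -- stop = t, no overshoot; block = 2^t
      have htL : (2:Int)^t ≤ (2:Int)^L := hjLe t ht
      have h1 : ∀ j, j < t → fnsCond minz maxz j :=
        fun j hj => (hcond j).mpr ⟨heven j hj, hjL j (by omega)⟩
      have h2 : ¬ fnsCond minz maxz t := fun hc => hoddt ((hcond t).mp hc).1
      rw [heval t (by omega) h1 h2, if_neg (by omega), hblock, min_eq_left (by omega)]
    · -- t > L : block = 2^L
      have hLt : L < t := by omega
      have hLtpow : (2:Int)^L ≤ (2:Int)^t := by
        have hn : (2^L : Nat) ≤ (2^t : Nat) := Nat.pow_le_pow_right (by norm_num) (by omega)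
        have hc1 : ((2^L : Nat) : Int) = (2:Int)^L := by push_cast; ring
        have hc2 : ((2^t : Nat) : Int) = (2:Int)^t := by push_cast; ring
        omega
      by_cases hpow : rn = 2^L
      · have hreq : r = (2:Int)^L := by omega
        have h1 : ∀ j, j < L → fnsCond minz maxz j :=
          fun j hj => (hcond j).mpr ⟨heven j (by omega), hjL j hj⟩
        have h2 : ¬ fnsCond minz maxz L := fun hc => by
          have := ((hcond L).mp hc).2
          omega
        rw [heval L (by omega) h1 h2, if_neg (by omega), hblock, min_eq_right (by omega)]
      · have hlt : (2:Int)^L < r := by omega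
        have h1 : ∀ j, j < L+1 → fnsCond minz maxz j := by
          intro j hj
          refine (hcond j).mpr ⟨heven j (by omega), ?_⟩
          have := hjLe j (by omega)
          omega
        have h2 : ¬ fnsCond minz maxz (L+1) := fun hc => by
          have := ((hcond (L+1)).mp hc).2
          omega
        rw [heval (L+1) (by omega) h1 h2, if_pos (by omega), Nat.add_sub_cancel,
          hblock, min_eq_right (by omega)]

-- B's block is positive and fits in the remaining range
lemma blockB_bounds (minz maxz : Int) (h : minz < maxz) :
    1 ≤ blockB minz maxz ∧ minz + blockB minz maxz ≤ maxz := by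
  set r := maxz - minz with hrdef
  have hr : 1 ≤ r := by omega
  have hrn : ((r.toNat : Int)) = r := Int.toNat_of_nonneg (by omega)
  have hna : r.natAbs = r.toNat := by omega
  have hble : 2^(PySem.Int.bitLength r - 1) ≤ r.natAbs :=
    PySem.Int.two_pow_bitLength_le r (by omega)
  have hcb : ((2^(PySem.Int.bitLength r - 1) : Nat) : Int) = (2:Int)^(PySem.Int.bitLength r - 1) := by
    push_cast
    ring
  have hppos : (1:Int) ≤ (2:Int)^(PySem.Int.bitLength r - 1) := by
    have : (0:Int) < 2^(PySem.Int.bitLength r - 1) := by positivity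
    omega
  have hple : (2:Int)^(PySem.Int.bitLength r - 1) ≤ r := by omega
  have hblock0 : blockB minz maxz
      = min (if minz ≠ 0 then PySem.Int.band minz (-minz) else r)
          ((2:Int)^(PySem.Int.bitLength r - 1)) := by
    unfold blockB
    rw [← hrdef]
    simp only [Int.shiftLeft_eq, one_mul]
  have halign : 1 ≤ (if minz ≠ 0 then PySem.Int.band minz (-minz) else r) := by
    by_cases hz : minz = 0
    · rw [if_neg (by simpa using hz)]
      omega
    · rw [if_pos (by simpa using hz)]
      obtain ⟨t, m, hmo, hfac0⟩ := Nat.exists_eq_two_pow_mul_odd (Int.natAbs_ne_zero.mpr hz)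
      obtain ⟨k, hk⟩ := hmo
      rw [band_neg_self minz t k (by rw [hfac0, hk])]
      have : (0:Int) < 2^t := by positivity
      omega
  rw [hblock0]
  refine ⟨le_min halign hppos, ?_⟩
  have := min_le_right (if minz ≠ 0 then PySem.Int.band minz (-minz) else r)
    ((2:Int)^(PySem.Int.bitLength r - 1))
  omega

lemma rttLoopB_exit (maxz : Int) (fuel : Nat) (minz : Int) (s b : List Int)
    (h : ¬ minz < maxz) : rttLoopB maxz fuel minz s b = (s, b) := by
  cases fuel with
  | zero => rfl
  | succ fuel => simp only [rttLoopB]; rw [if_neg h]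

lemma loops_eq (maxz : Int) : ∀ (fuel : Nat) (minz : Int) (s b : List Int),
    minz < maxz → maxz - minz ≤ 8589934592 → (maxz - minz).toNat ≤ fuel →
    rttLoopA maxz fuel minz s b = rttLoopB maxz fuel minz s b := by
  intro fuel
  induction fuel with
  | zero => intro minz s b h1 h2 h3; omega
  | succ fuel ih =>
    intro minz s b h1 h2 h3
    have hstep := step_eq minz maxz h1 h2
    obtain ⟨hb1, hb2⟩ := blockB_bounds minz maxz h1
    simp only [rttLoopA, rttLoopB]
    rw [if_pos h1, hstep]
    by_cases hend : minz + blockB minz maxz = maxz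
    · rw [if_pos hend, rttLoopB_exit maxz fuel _ _ _ (by omega)]
    · rw [if_neg hend]
      exact ih (minz + blockB minz maxz) _ _ (by omega) (by omega) (by omega)

-- ===== VERDICT (by name: the statement is the Claim_ definition above) =====
theorem range_to_tenary_spec : Claim_equal_range_to_tenary := by
  intro minz maxz hdom
  unfold Spec_range_to_tenary
  have hbounds : -2147483648 ≤ minz ∧ minz ≤ 2147483648 ∧ -2147483648 ≤ maxz ∧ maxz ≤ 2147483648 := by
    unfold Dom_range_to_tenary pvDomInt at hdom
    simp at hdom
    omega
  unfold range_to_tenary range_to_tenary_alt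
  by_cases h : maxz ≤ minz
  · rw [if_pos h, if_pos h]
  · rw [if_neg h, if_neg h]
    exact loops_eq maxz (maxz - minz).toNat minz [] [] (by omega) (by omega) (le_refl _)
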